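-- pv_equiv track=rewrite | github.com/domerin0/rnn-speech | util/dataprocessor.py | get_labels_str
-- ===== SOURCE A (Python) =====
-- def get_labels_str(char_map, label):
--     """
--     Convert a vector issued from the model into a readable string
--
--     Parameters
--     ----------
--     :param char_map : the char_map against which to transcode the vector
--     :param label : a vector of int containing the predicted label
--
--     Returns
--     -------
--     :return string : the resulting string
--     """
--     # Convert int to values in self.char_map
--     char_list = [char_map[index] for index in label if 0 <= index < len(char_map)]
--     # Remove eos character if present
--     try:
--         char_list.remove(char_map[-1])
--     except ValueError:
--         pass
--     # Add spaces in front of capitalized letters (except the first one) and lower every letter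
--     result = []
--     for i in range(len(char_list)):
--         if (i != 0) and (char_list[i].isupper()):
--             result.append(" ")
--         result.append(char_list[i].lower())
--     return "".join(result)
-- ===== SOURCE B (Python) =====
-- def get_labels_str(char_map, label):
--     """Single pass over label: skip out-of-range indices, drop the first EOS
--     occurrence, and emit lowered chars with a space before later uppercase ones."""
--     eos = char_map[-1]
--     out = []
--     skipped_eos = False
--     for index in label:
--         if not (0 <= index < len(char_map)):
--             continue
--         c = char_map[index]
--         if not skipped_eos and c == eos:
--             skipped_eos = True
--             continue
--         if out and c.isupper():
--             out.append(" ")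
--         out.append(c.lower())
--     return "".join(out)
-- ===== Notes on version B (the rewrite author's own statement) =====
-- stated objective: simpler
-- what changed: Replaces A's three phases (build char_list, list.remove the first EOS via try/except, then an index loop inserting spaces) with one fused pass over label keeping two flags (EOS skipped, output-nonempty), with no intermediate list and no exception handling.
import Mathlib
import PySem

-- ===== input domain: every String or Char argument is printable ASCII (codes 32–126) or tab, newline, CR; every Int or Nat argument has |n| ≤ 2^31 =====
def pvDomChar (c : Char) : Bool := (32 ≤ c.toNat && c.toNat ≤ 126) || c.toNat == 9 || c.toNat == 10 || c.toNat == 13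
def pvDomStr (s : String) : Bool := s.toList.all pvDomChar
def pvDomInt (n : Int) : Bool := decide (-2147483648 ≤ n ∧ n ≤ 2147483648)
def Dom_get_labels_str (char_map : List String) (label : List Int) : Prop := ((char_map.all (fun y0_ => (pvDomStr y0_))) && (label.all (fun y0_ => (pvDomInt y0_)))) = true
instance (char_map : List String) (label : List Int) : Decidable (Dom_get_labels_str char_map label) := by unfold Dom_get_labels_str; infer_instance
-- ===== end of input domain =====

-- B fuses A's three phases (build list, remove first EOS, spacing loop) into one pass over label; proved equal on nonempty char_map (A raises IndexError on char_map = []).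


-- Python str.isupper, exact on the printable-ASCII domain: some cased (= letter) char, and no lowercase char
def pvStrIsupper (s : String) : Bool :=
  s.toList.any PySem.Chars.isupper && !(s.toList.any PySem.Chars.islower)

-- ===== PORT A =====
def get_labels_str (char_map : List String) (label : List Int) : String :=
  -- char_list = [char_map[index] for index in label if 0 <= index < len(char_map)]
  let char_list : List String :=
    (label.filter (fun i => decide (0 ≤ i ∧ i < (char_map.length : Int)))).map
      (fun i => PySem.List.pyGetD char_map i "")   -- in range by the filter, so the default is never used
  -- try: char_list.remove(char_map[-1]) except ValueError: pass  (Pre_ rules out char_map = [], where Python raises IndexError)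
  let char_list : List String :=
    match PySem.List.remove? char_list (PySem.List.pyGetD char_map (-1) "") with
    | some l => l
    | none => char_list
  -- for i in range(len(char_list)): …
  let result : List String :=
    (List.range char_list.length).foldl (fun res i =>
      let res := if i ≠ 0 ∧ pvStrIsupper (char_list.getD i "") then res ++ [" "] else res
      res ++ [PySem.Str.lower (char_list.getD i "")]) []
  PySem.Str.join "" result

-- ===== PORT B =====
def get_labels_str_alt (char_map : List String) (label : List Int) : String :=
  let eos := PySem.List.pyGetD char_map (-1) ""   -- Pre_ rules out char_map = []
  let st : Bool × List String :=
    label.foldl (fun st i =>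
      if 0 ≤ i ∧ i < (char_map.length : Int) then
        let c := PySem.List.pyGetD char_map i ""
        if ¬ st.1 ∧ c = eos then (true, st.2)
        else (st.1, (if st.2 ≠ [] ∧ pvStrIsupper c then st.2 ++ [" "] else st.2) ++ [PySem.Str.lower c])
      else st) (false, [])
  PySem.Str.join "" st.2

-- ===== PRECONDITION & SPEC =====
-- Pre_ excludes char_map = [], on which Python A raises IndexError at char_map[-1]
def Pre_get_labels_str (char_map : List String) (label : List Int) : Prop := char_map ≠ []
instance (char_map : List String) (label : List Int) : Decidable (Pre_get_labels_str char_map label) := by unfold Pre_get_labels_str; infer_instance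
def pvWitness_get_labels_str : List String × List Int := (["a", "B", "."], [0, 1, 2, -1, 5, 0])

def Spec_get_labels_str (char_map : List String) (label : List Int) (out : String) : Prop := out = get_labels_str_alt char_map label
instance (char_map : List String) (label : List Int) (out : String) : Decidable (Spec_get_labels_str char_map label out) := by unfold Spec_get_labels_str; infer_instance

-- ===== CLAIM (what is proved, stated in full; the proofs are below) =====
def Claim_equal_get_labels_str : Prop := ∀ (char_map : List String) (label : List Int), Dom_get_labels_str char_map label → Pre_get_labels_str char_map label → Spec_get_labels_str char_map label (get_labels_str char_map label)

-- ===== LEMMAS AND PROOFS =====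

-- named copies (definitionally equal) of the ports' loop pieces, for rewriting
def pvCharList (char_map : List String) (label : List Int) : List String :=
  (label.filter (fun i => decide (0 ≤ i ∧ i < (char_map.length : Int)))).map
    (fun i => PySem.List.pyGetD char_map i "")

def pvRemoveFirst (cl : List String) (v : String) : List String :=
  match PySem.List.remove? cl v with
  | some l => l
  | none => cl

def pvSpaceFold (cl : List String) : List String :=
  (List.range cl.length).foldl (fun res i =>
    let res := if i ≠ 0 ∧ pvStrIsupper (cl.getD i "") then res ++ [" "] else res
    res ++ [PySem.Str.lower (cl.getD i "")]) []

def pvEmit (out : List String) (c : String) : List String :=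
  (if out ≠ [] ∧ pvStrIsupper c then out ++ [" "] else out) ++ [PySem.Str.lower c]

def pvStepS (v : String) (st : Bool × List String) (c : String) : Bool × List String :=
  if ¬ st.1 ∧ c = v then (true, st.2) else (st.1, pvEmit st.2 c)

def pvStepI (char_map : List String) (v : String) (st : Bool × List String) (i : Int) : Bool × List String :=
  if 0 ≤ i ∧ i < (char_map.length : Int) then pvStepS v st (PySem.List.pyGetD char_map i "")
  else st

theorem pvEmit_foldl_ne_nil (cl : List String) (acc : List String) (h : cl ≠ []) :
    cl.foldl pvEmit acc ≠ [] := by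
  induction cl generalizing acc with
  | nil => exact absurd rfl h
  | cons c cl ih =>
    simp only [List.foldl_cons]
    rcases cl with _ | ⟨d, cl⟩
    · simp [pvEmit]
    · exact ih _ (by simp)

-- A's index loop over range(len cl) equals the structural fold with pvEmit
theorem pvSpaceFold_eq (cl : List String) : pvSpaceFold cl = cl.foldl pvEmit [] := by
  induction cl using List.reverseRecOn with
  | nil => simp [pvSpaceFold]
  | append_singleton cl c ih =>
    unfold pvSpaceFold
    have hlen : (cl ++ [c]).length = cl.length + 1 := by simp
    rw [hlen, List.range_succ, List.foldl_append, List.foldl_append]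
    have hcongr : (List.range cl.length).foldl (fun res i =>
        let res := if i ≠ 0 ∧ pvStrIsupper ((cl ++ [c]).getD i "") then res ++ [" "] else res
        res ++ [PySem.Str.lower ((cl ++ [c]).getD i "")]) [] = pvSpaceFold cl := by
      unfold pvSpaceFold
      apply PySem.List.foldl_congr_mem
      intro acc i hi
      have hi' : i < cl.length := List.mem_range.mp hi
      simp [List.getD, List.getElem?_append_left hi']
    rw [hcongr, ih]
    have hget : (cl ++ [c]).getD cl.length "" = c := by simp [List.getD]
    simp only [List.foldl_cons, List.foldl_nil, hget]
    rcases cl with _ | ⟨d, cl'⟩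
    · simp [pvEmit]
    · have hne : List.foldl pvEmit [PySem.Str.lower d] cl' ≠ [] := by
        simpa [pvEmit] using pvEmit_foldl_ne_nil (d :: cl') [] (by simp)
      simp [pvEmit, hne]

theorem pvBfold_true (cl : List String) (v : String) (out : List String) :
    (cl.foldl (pvStepS v) (true, out)).2 = cl.foldl pvEmit out := by
  induction cl generalizing out with
  | nil => rfl
  | cons c cl ih =>
    simp only [List.foldl_cons, pvStepS]
    rw [if_neg (by simp)]
    exact ih (pvEmit out c)

-- B's flagged fold over cl equals: drop the first v, then fold with pvEmit
theorem pvBfold_false (cl : List String) (v : String) (out : List String) :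
    (cl.foldl (pvStepS v) (false, out)).2 = (pvRemoveFirst cl v).foldl pvEmit out := by
  induction cl generalizing out with
  | nil => simp [pvRemoveFirst, PySem.List.remove?]
  | cons c cl ih =>
    by_cases hc : c = v
    · subst hc
      simp only [List.foldl_cons, pvRemoveFirst, PySem.List.remove?_cons_self, pvStepS]
      rw [if_pos (by simp)]
      exact pvBfold_true cl c out
    · have hrf : pvRemoveFirst (c :: cl) v = c :: pvRemoveFirst cl v := by
        unfold pvRemoveFirst
        rw [PySem.List.remove?_cons_of_ne cl hc]
        cases PySem.List.remove? cl v <;> simp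
      simp only [List.foldl_cons, hrf, pvStepS]
      rw [if_neg (by simp [hc])]
      exact ih (pvEmit out c)

-- B's fold over label equals the same flagged fold over A's char_list
theorem pvBfold_over_label (char_map : List String) (label : List Int) (v : String) (st : Bool × List String) :
    label.foldl (pvStepI char_map v) st = (pvCharList char_map label).foldl (pvStepS v) st := by
  induction label generalizing st with
  | nil => rfl
  | cons i label ih =>
    by_cases hi : 0 ≤ i ∧ i < (char_map.length : Int)
    · simp only [List.foldl_cons, pvCharList, List.filter_cons, decide_eq_true hi,
        pvStepI, if_pos hi]
      exact ih _
    · have hd : decide (0 ≤ i ∧ i < (char_map.length : Int)) = false := by simpa using hi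
      simp only [List.foldl_cons, pvCharList, List.filter_cons, hd, pvStepI, if_neg hi,
        Bool.false_eq_true, if_false]
      exact ih st

-- ===== VERDICT (by name: the statement is the Claim_ definition above) =====
theorem get_labels_str_spec : Claim_equal_get_labels_str := by
  intro char_map label _ _
  show get_labels_str char_map label = get_labels_str_alt char_map label
  have hA : get_labels_str char_map label =
      PySem.Str.join "" (pvSpaceFold (pvRemoveFirst (pvCharList char_map label)
        (PySem.List.pyGetD char_map (-1) ""))) := rfl
  have hB : get_labels_str_alt char_map label =
      PySem.Str.join "" ((label.foldl (pvStepI char_map (PySem.List.pyGetD char_map (-1) ""))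
        (false, [])).2) := rfl
  rw [hA, hB, pvBfold_over_label, pvBfold_false, pvSpaceFold_eq]
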